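-- pv_equiv track=rewrite | github.com/yougi8/CodingTestStudy | 프로그래머스/numDiv.py | solution
-- ===== SOURCE A (Python) =====
-- def cal(a, b):  # 최대 공약수 구하기
--     if a % b == 0:
--         return b
--     return cal(b, a % b)  # 35 = 17*2 + 1 인 것을 생각!
--
-- def solution(arrayA, arrayB):
--     a = arrayA[0]
--     b = arrayB[0]
--
--     for i in range(1, len(arrayA)):
--         a = cal(arrayA[i], a)
--         b = cal(arrayB[i], b)
--
--     answerA = a
--     answerB = b
--
--     # 최대공약수가 다른 숫자카드와 나누어 떨어지는지 확인
--     for i in range(len(arrayA)):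
--         if arrayA[i] % b == 0:  # 영희 숫자카드가 철수 숫자를 나누는지 확인
--             answerB = 0
--         if arrayB[i] % a == 0:  # 철수 숫자카드가 영희 숫자를 나누는지 확인
--             answerA = 0
--
--     return max(answerA, answerB)
-- ===== SOURCE B (Python) =====
-- def gcd_iter(a, b):
--     while a % b != 0:
--         a, b = b, a % b
--     return b
--
-- def solution(arrayA, arrayB):
--     a, b = arrayA[0], arrayB[0]
--     for x, y in zip(arrayA[1:], arrayB[1:]):
--         a = gcd_iter(x, a)
--         b = gcd_iter(y, b)
--     answerA = a if all(y % a != 0 for _, y in zip(arrayA, arrayB)) else 0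
--     answerB = b if all(x % b != 0 for x, _ in zip(arrayA, arrayB)) else 0
--     return max(answerA, answerB)
-- ===== Notes on version B (the rewrite author's own statement) =====
-- stated objective: idiomatic
-- what changed: B rewrites the recursive gcd helper as an explicit Euclidean while-loop and replaces A's index loops with zip-based iteration and all()-scans instead of flag mutation; Pre_ excludes the inputs where A raises (empty arrayA, arrayB shorter than arrayA, or a zero first element, giving IndexError/ZeroDivisionError).
import Mathlib
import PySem

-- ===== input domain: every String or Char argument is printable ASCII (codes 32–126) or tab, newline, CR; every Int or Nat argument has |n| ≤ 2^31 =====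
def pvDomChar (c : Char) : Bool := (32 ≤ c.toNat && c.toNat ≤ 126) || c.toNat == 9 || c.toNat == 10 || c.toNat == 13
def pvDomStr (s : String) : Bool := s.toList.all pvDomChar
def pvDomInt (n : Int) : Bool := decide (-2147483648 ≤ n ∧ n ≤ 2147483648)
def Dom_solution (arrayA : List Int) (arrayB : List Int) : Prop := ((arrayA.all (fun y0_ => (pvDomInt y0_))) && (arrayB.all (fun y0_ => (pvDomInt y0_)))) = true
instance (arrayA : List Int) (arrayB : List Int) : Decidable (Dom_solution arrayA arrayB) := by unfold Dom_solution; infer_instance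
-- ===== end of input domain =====

-- B rewrites the recursive gcd helper as an explicit Euclidean while-loop and replaces the index
-- loops by zip-based iteration with all()-scans instead of flag mutation (idiomatic, same cost;
-- return-value equivalence on Pre_).

-- termination measure for both Euclid ports: |a % b| < |b| when b ≠ 0 (Python % has the divisor's sign)
lemma pvModAbsLt (a b : Int) (hb : ¬ b = 0) : (PySem.Int.mod a b).natAbs < b.natAbs := by
  rcases lt_or_gt_of_ne hb with h | h
  · have h2 := PySem.Int.mod_neg_bounds a h
    omega
  · have h1 := PySem.Int.mod_nonneg a h
    have h2 := PySem.Int.mod_lt a h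
    omega

-- ===== PORT A =====
-- cal(a, b): recursive gcd; Python raises ZeroDivisionError when b == 0 (those inputs are outside
-- Pre_; the 'if b = 0 then 0' branch only totalizes the Lean function)
def cal (a b : Int) : Int :=
  if _hb : b = 0 then 0
  else if PySem.Int.mod a b = 0 then b
  else cal b (PySem.Int.mod a b)
termination_by b.natAbs
decreasing_by exact pvModAbsLt a b _hb

def solution (arrayA : List Int) (arrayB : List Int) : Int :=
  let a0 := PySem.List.pyGetD arrayA 0 0        -- arrayA[0] (Pre_ guarantees nonempty)
  let b0 := PySem.List.pyGetD arrayB 0 0        -- arrayB[0]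
  let n : Int := arrayA.length
  let ab := (PySem.List.pyRange 1 n 1).foldl
      (fun (s : Int × Int) i =>
        (cal (PySem.List.pyGetD arrayA i 0) s.1, cal (PySem.List.pyGetD arrayB i 0) s.2))
      (a0, b0)
  let ans := (PySem.List.pyRange 0 n 1).foldl
      (fun (s : Int × Int) i =>
        let s1 := if PySem.Int.mod (PySem.List.pyGetD arrayA i 0) ab.2 = 0 then (s.1, (0 : Int)) else s
        if PySem.Int.mod (PySem.List.pyGetD arrayB i 0) ab.1 = 0 then ((0 : Int), s1.2) else s1)
      ab
  max ans.1 ans.2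

-- ===== PORT B =====
-- gcd_iter: while a % b != 0: a, b = b, a % b; return b  (loop state as recursion arguments;
-- the 'if b = 0 then 0' branch only totalizes where Python raises ZeroDivisionError)
def gcdIter (a b : Int) : Int :=
  if _hb : b = 0 then 0
  else if PySem.Int.mod a b ≠ 0 then gcdIter b (PySem.Int.mod a b)
  else b
termination_by b.natAbs
decreasing_by exact pvModAbsLt a b _hb

def solution_alt (arrayA : List Int) (arrayB : List Int) : Int :=
  let a0 := PySem.List.pyGetD arrayA 0 0
  let b0 := PySem.List.pyGetD arrayB 0 0
  let ab := ((PySem.List.slice arrayA (some 1) none).zip (PySem.List.slice arrayB (some 1) none)).foldl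
      (fun (s : Int × Int) p => (gcdIter p.1 s.1, gcdIter p.2 s.2)) (a0, b0)
  let answerA := if (arrayA.zip arrayB).all (fun p => !(PySem.Int.mod p.2 ab.1 == 0)) then ab.1 else 0
  let answerB := if (arrayA.zip arrayB).all (fun p => !(PySem.Int.mod p.1 ab.2 == 0)) then ab.2 else 0
  max answerA answerB

-- ===== PRECONDITION & SPEC =====
-- Pre_ excludes exactly the inputs where A raises: IndexError on an empty arrayA or an arrayB
-- shorter than arrayA, and ZeroDivisionError when arrayA[0] == 0 or arrayB[0] == 0.
def Pre_solution (arrayA : List Int) (arrayB : List Int) : Prop :=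
  arrayA ≠ [] ∧ arrayA.length ≤ arrayB.length ∧
  PySem.List.pyGetD arrayA 0 0 ≠ 0 ∧ PySem.List.pyGetD arrayB 0 0 ≠ 0
instance (arrayA : List Int) (arrayB : List Int) : Decidable (Pre_solution arrayA arrayB) := by
  unfold Pre_solution; infer_instance

def pvWitness_solution : List Int × List Int := ([6, -4], [10, 5])

def Spec_solution (arrayA : List Int) (arrayB : List Int) (out : Int) : Prop := out = solution_alt arrayA arrayB
instance (arrayA : List Int) (arrayB : List Int) (out : Int) : Decidable (Spec_solution arrayA arrayB out) := by unfold Spec_solution; infer_instance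

-- ===== CLAIM (what is proved, stated in full; the proofs are below) =====
def Claim_equal_solution : Prop := ∀ (arrayA : List Int) (arrayB : List Int), Dom_solution arrayA arrayB → Pre_solution arrayA arrayB → Spec_solution arrayA arrayB (solution arrayA arrayB)


-- ===== LEMMAS AND PROOFS =====

-- the two helpers are the same Euclidean recursion, written recursively vs as a loop
lemma cal_eq_gcdIter : ∀ (a b : Int), cal a b = gcdIter a b := by
  intro a b
  induction a, b using cal.induct with
  | case1 a => rw [cal, gcdIter]; simp
  | case2 a b hb hm => rw [cal, gcdIter]; simp [hb, hm]
  | case3 a b hb hm ih => rw [cal, gcdIter]; simp [hb, hm, ih]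

-- A's first-loop pair fold split componentwise
lemma pairFold (A B : List Int) (l : List Int) (x y : Int) :
    l.foldl (fun (s : Int × Int) i =>
        (cal (PySem.List.pyGetD A i 0) s.1, cal (PySem.List.pyGetD B i 0) s.2)) (x, y)
      = (l.foldl (fun s i => cal (PySem.List.pyGetD A i 0) s) x,
         l.foldl (fun s i => cal (PySem.List.pyGetD B i 0) s) y) := by
  induction l generalizing x y with
  | nil => rfl
  | cons i l ih => simp only [List.foldl_cons]; exact ih _ _

-- index-fold over a prefix of xs is a fold over the prefix list
lemma foldl_range_take {β : Type} (xs : List Int) (n : Nat) (hn : n ≤ xs.length)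
    (f : β → Int → β) (init : β) (a : Int) (ha : 0 ≤ a) :
    (PySem.List.pyRange a (n : Int) 1).foldl (fun acc j => f acc (PySem.List.pyGetD xs j 0)) init
      = ((xs.take n).drop a.toNat).foldl f init := by
  have hlen : (xs.take n).length = n := by simp [hn]
  have hcast : ((n : Nat) : Int) = (((xs.take n).length : Nat) : Int) := by rw [hlen]
  rw [hcast]
  rw [PySem.List.foldl_congr_mem _ _ (fun acc j => f acc (PySem.List.pyGetD (xs.take n) j 0)) init ?_]
  · exact PySem.List.foldl_pyRange_pyGetD' (xs.take n) 0 f init ha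
  · intro acc j hj
    have hj' := (PySem.List.mem_pyRange_one).1 hj
    rw [hlen] at hj'
    have h0 : 0 ≤ j := le_trans ha hj'.1
    show f acc (PySem.List.pyGetD xs j 0) = f acc (PySem.List.pyGetD (xs.take n) j 0)
    rw [PySem.List.pyGetD_eq_getElem xs 0 h0 (by exact_mod_cast lt_of_lt_of_le hj'.2 (by exact_mod_cast hn)),
        PySem.List.pyGetD_eq_getElem (xs.take n) 0 h0 (by rw [hlen]; exact hj'.2)]
    exact congrArg (f acc) List.getElem_take.symm

-- B's zip fold split componentwise: first components walk l1, second the matching prefix of l2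
lemma zip_foldl_split (l1 : List Int) (l2 : List Int) (g h : Int → Int → Int) (x y : Int) :
    (l1.zip l2).foldl (fun (s : Int × Int) p => (g p.1 s.1, h p.2 s.2)) (x, y)
      = ((l1.take l2.length).foldl (fun s v => g v s) x,
         (l2.take l1.length).foldl (fun s v => h v s) y) := by
  induction l1 generalizing l2 x y with
  | nil => simp
  | cons v l1 ih =>
    cases l2 with
    | nil => simp
    | cons w l2 => simp only [List.zip_cons_cons, List.foldl_cons, List.length_cons,
        List.take_succ_cons, ih]

-- A's check loop: the pair of zero-or-keep flags is two independent existence tests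
lemma foldl_zero_flags (l : List Int) (P Q : Int → Prop) [DecidablePred P] [DecidablePred Q]
    (x y : Int) :
    l.foldl (fun (s : Int × Int) i =>
        let s1 := if P i then (s.1, (0:Int)) else s
        if Q i then ((0:Int), s1.2) else s1) (x, y)
      = ((if ∃ i ∈ l, Q i then 0 else x), (if ∃ i ∈ l, P i then 0 else y)) := by
  induction l generalizing x y with
  | nil => simp
  | cons j l ih =>
    simp only [List.foldl_cons]
    by_cases hP : P j <;> by_cases hQ : Q j <;>
      simp [hP, hQ, ih]

-- existence over range indices is existence over the prefix list
lemma exists_range_take (xs : List Int) (n : Nat) (hn : n ≤ xs.length) (R : Int → Prop) :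
    (∃ i ∈ PySem.List.pyRange 0 (n : Int) 1, R (PySem.List.pyGetD xs i 0))
      ↔ (∃ v ∈ xs.take n, R v) := by
  constructor
  · rintro ⟨i, hi, hR⟩
    have hi' := (PySem.List.mem_pyRange_one).1 hi
    have h0 : 0 ≤ i := hi'.1
    have hlt : i < (n:Int) := hi'.2
    refine ⟨xs[i.toNat], ?_, ?_⟩
    · have : (xs.take n)[i.toNat]'(by simp [hn]; omega) = xs[i.toNat]'(by omega) :=
        List.getElem_take
      exact this ▸ List.getElem_mem _
    · rwa [PySem.List.pyGetD_eq_getElem xs 0 h0 (by omega)] at hR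
  · rintro ⟨v, hv, hR⟩
    obtain ⟨k, hk, hkv⟩ := List.mem_iff_getElem.1 hv
    have hklen : (xs.take n).length = n := by simp [hn]
    refine ⟨(k : Int), ?_, ?_⟩
    · exact (PySem.List.mem_pyRange_one).2 ⟨by positivity, by exact_mod_cast hklen ▸ hk⟩
    · rw [PySem.List.pyGetD_eq_getElem xs 0 (by positivity) (by exact_mod_cast (by omega : k < xs.length))]
      have : xs[k]'(by omega) = (xs.take n)[k]'hk := List.getElem_take.symm
      simp only [Int.toNat_natCast]
      rw [this, hkv]
      exact hR

-- membership in a zip, projected to each side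
lemma zip_exists_snd (l1 l2 : List Int) (P : Int → Prop) :
    (∃ p ∈ l1.zip l2, P p.2) ↔ (∃ v ∈ l2.take l1.length, P v) := by
  induction l1 generalizing l2 with
  | nil => simp
  | cons x l1 ih =>
    cases l2 with
    | nil => simp
    | cons y l2 => simp [ih]

lemma zip_exists_fst (l1 l2 : List Int) (P : Int → Prop) :
    (∃ p ∈ l1.zip l2, P p.1) ↔ (∃ v ∈ l1.take l2.length, P v) := by
  induction l1 generalizing l2 with
  | nil => simp
  | cons x l1 ih =>
    cases l2 with
    | nil => simp
    | cons y l2 => simp [ih]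

-- ===== VERDICT (by name: the statement is the Claim_ definition above) =====
theorem solution_spec : Claim_equal_solution := by
  intro arrayA arrayB _ hpre
  obtain ⟨hne, hlenle, ha0', hb0'⟩ := hpre
  cases arrayA with
  | nil => exact absurd rfl hne
  | cons a0 ar =>
  cases arrayB with
  | nil => exact absurd hlenle (by simp)
  | cons b0 br =>
  unfold Spec_solution
  have hale : (a0 :: ar).length ≤ (b0 :: br).length := hlenle
  have harbr : ar.length ≤ br.length := by simpa using hale
  -- A's first loop as folds over list prefixes
  have hfa : (PySem.List.pyRange 1 ((a0::ar).length : Int) 1).foldl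
      (fun s i => cal (PySem.List.pyGetD (a0::ar) i 0) s) a0
      = ar.foldl (fun s v => cal v s) a0 := by
    have h := foldl_range_take (a0::ar) (a0::ar).length le_rfl (fun s x => cal x s) a0 1 (by norm_num)
    simpa using h
  have hfb : (PySem.List.pyRange 1 ((a0::ar).length : Int) 1).foldl
      (fun s i => cal (PySem.List.pyGetD (b0::br) i 0) s) b0
      = (br.take ar.length).foldl (fun s v => cal v s) b0 := by
    have h := foldl_range_take (b0::br) (a0::ar).length hale (fun s x => cal x s) b0 1 (by norm_num)
    simpa [List.take_succ_cons] using h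
  -- B's first loop, split componentwise
  have hslA : PySem.List.slice (a0::ar) (some 1) none = ar := by
    simpa using PySem.List.slice_from_one (a0::ar)
  have hslB : PySem.List.slice (b0::br) (some 1) none = br := by
    simpa using PySem.List.slice_from_one (b0::br)
  have hzf : (ar.zip br).foldl
      (fun (s : Int × Int) p => (gcdIter p.1 s.1, gcdIter p.2 s.2)) (a0, b0)
      = ((ar.take br.length).foldl (fun s v => gcdIter v s) a0,
         (br.take ar.length).foldl (fun s v => gcdIter v s) b0) :=
    zip_foldl_split ar br _ _ a0 b0
  have htakeA : ar.take br.length = ar := List.take_of_length_le harbr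
  -- both accumulated pairs coincide (cal = gcdIter pointwise)
  have hfuneq : (fun (s v : Int) => cal v s) = (fun s v => gcdIter v s) := by
    funext s v; exact cal_eq_gcdIter v s
  -- evaluate both programs
  simp only [solution, solution_alt, PySem.List.pyGetD_zero_cons, hslA, hslB]
  rw [pairFold, hfa, hfb, hzf, htakeA, hfuneq]
  set a := ar.foldl (fun s v => gcdIter v s) a0 with ha
  set b := (br.take ar.length).foldl (fun s v => gcdIter v s) b0 with hb
  rw [foldl_zero_flags (PySem.List.pyRange 0 ((a0::ar).length : Int) 1)
        (fun i => PySem.Int.mod (PySem.List.pyGetD (a0::ar) i 0) b = 0)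
        (fun i => PySem.Int.mod (PySem.List.pyGetD (b0::br) i 0) a = 0)]
  -- the four conditions, rewritten to the same propositions
  have hcA : (∃ i ∈ PySem.List.pyRange 0 ((a0::ar).length : Int) 1,
        PySem.Int.mod (PySem.List.pyGetD (b0::br) i 0) a = 0)
      ↔ (∃ p ∈ (a0::ar).zip (b0::br), PySem.Int.mod p.2 a = 0) := by
    rw [exists_range_take (b0::br) (a0::ar).length hale
        (fun v => PySem.Int.mod v a = 0),
      zip_exists_snd (a0::ar) (b0::br) (fun v => PySem.Int.mod v a = 0)]
  have hcB : (∃ i ∈ PySem.List.pyRange 0 ((a0::ar).length : Int) 1,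
        PySem.Int.mod (PySem.List.pyGetD (a0::ar) i 0) b = 0)
      ↔ (∃ p ∈ (a0::ar).zip (b0::br), PySem.Int.mod p.1 b = 0) := by
    rw [exists_range_take (a0::ar) (a0::ar).length le_rfl
        (fun v => PySem.Int.mod v b = 0), List.take_length,
      zip_exists_fst (a0::ar) (b0::br) (fun v => PySem.Int.mod v b = 0),
      List.take_of_length_le hale]
  have hallA : ((a0::ar).zip (b0::br)).all (fun p => !(PySem.Int.mod p.2 a == 0))
      = !decide (∃ p ∈ (a0::ar).zip (b0::br), PySem.Int.mod p.2 a = 0) := by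
    rw [Bool.eq_iff_iff]; simp [List.all_eq_true]
  have hallB : ((a0::ar).zip (b0::br)).all (fun p => !(PySem.Int.mod p.1 b == 0))
      = !decide (∃ p ∈ (a0::ar).zip (b0::br), PySem.Int.mod p.1 b = 0) := by
    rw [Bool.eq_iff_iff]; simp [List.all_eq_true]
  simp only [hallA, hallB, hcA, hcB]
  by_cases hA : ∃ p ∈ (a0::ar).zip (b0::br), PySem.Int.mod p.2 a = 0 <;>
    by_cases hB : ∃ p ∈ (a0::ar).zip (b0::br), PySem.Int.mod p.1 b = 0
  · simp only [eq_true hA, eq_true hB]; simp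
  · simp only [eq_true hA, eq_false hB]; simp
  · simp only [eq_false hA, eq_true hB]; simp
  · simp only [eq_false hA, eq_false hB]; simp
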